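-- pv_equiv track=rewrite | github.com/psylsph/BookAgent | booksmith/pipeline/chapter_writer.py | extract_character_names_from_outline
-- ===== SOURCE A (Python) =====
-- from typing import Generator, List, Optional
--
-- def extract_character_names_from_outline(
--     outline: str, available_names: List[str]
-- ) -> List[str]:
--     """Extract character names mentioned in the chapter outline.
--
--     Only returns names that exist in the available character list.
--     Falls back to all available names if none are found in the outline.
--     """
--     outline_lower = outline.lower()
--     mentioned = []
--     for name in available_names:
--         if name.lower() in outline_lower:
--             mentioned.append(name)
--     return mentioned if mentioned else available_names
-- ===== SOURCE B (Python) =====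
-- def extract_character_names_from_outline(outline, available_names):
--     """Index the names by the first letter of their lowercase form, then scan
--     the lowered outline once: at each position only the names that can start
--     there are tested.  Returns the matched names in their original order, or
--     all names if none matched."""
--     low = outline.lower()
--     by_first = {}
--     matched = set()
--     for name in available_names:
--         t = name.lower()
--         if t:
--             by_first.setdefault(t[0], []).append(name)
--         else:
--             matched.add(name)
--     for pos, ch in enumerate(low):
--         for name in by_first.get(ch, []):
--             if name not in matched and low.startswith(name.lower(), pos):
--                 matched.add(name)
--     mentioned = [name for name in available_names if name in matched]
--     return mentioned or available_names
-- ===== Notes on version B (the rewrite author's own statement) =====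
-- stated objective: alternative
-- what changed: B builds a first-lowercase-letter index of the names once, then scans the lowered outline in a single position-by-position pass, testing at each position only the bucket of names that can start there and accumulating a found-set, instead of A's name-major loop doing one substring search per name.
import Mathlib
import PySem

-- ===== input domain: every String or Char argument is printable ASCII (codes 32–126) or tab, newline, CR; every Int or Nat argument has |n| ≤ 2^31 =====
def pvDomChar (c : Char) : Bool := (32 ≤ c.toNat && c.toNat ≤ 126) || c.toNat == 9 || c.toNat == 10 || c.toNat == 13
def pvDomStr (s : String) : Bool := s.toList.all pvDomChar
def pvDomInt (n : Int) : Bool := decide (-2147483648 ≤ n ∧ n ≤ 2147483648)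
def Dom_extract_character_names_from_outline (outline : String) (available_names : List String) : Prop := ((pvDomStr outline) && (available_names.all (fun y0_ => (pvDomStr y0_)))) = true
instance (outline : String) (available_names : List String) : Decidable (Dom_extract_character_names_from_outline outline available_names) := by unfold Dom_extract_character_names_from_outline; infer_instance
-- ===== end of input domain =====

-- B indexes the names by first lowercase letter and scans the outline once,
-- testing at each position only the names that can start there, instead of
-- A's one substring search per name; objective: alternative.
-- ===== PORT A =====
def extract_character_names_from_outline (outline : String) (available_names : List String) : List String :=
  let outline_lower := PySem.Str.lower outline
  let mentioned := available_names.foldl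
    (fun acc name => if PySem.Str.isIn (PySem.Str.lower name) outline_lower then acc ++ [name] else acc) []
  if mentioned.isEmpty then available_names else mentioned

-- ===== PORT B =====
-- by_first.setdefault(c, []).append(name) is PySem.Dict.modify c [] (· ++ [name]);
-- low.startswith(t, pos) is ported by hand as List.isPrefixOf on the dropped suffix:
-- exact for the nonnegative positions 0 ≤ pos < len(low) produced by enumerate.
def extract_character_names_from_outline_alt (outline : String) (available_names : List String) : List String :=
  let low := (PySem.Str.lower outline).toList
  let init : PySem.Dict Char (List String) × PySem.Set String :=
    available_names.foldl
      (fun st name =>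
        match (PySem.Str.lower name).toList with
        | [] => (st.1, st.2.add name)
        | c :: _ => (st.1.modify c [] (fun l => l ++ [name]), st.2))
      (PySem.Dict.empty, PySem.Set.empty)
  let matched :=
    (PySem.List.enumerate low 0).foldl
      (fun m pc =>
        (init.1.getD pc.2 []).foldl
          (fun m name =>
            if ¬ m.contains name ∧ List.isPrefixOf (PySem.Str.lower name).toList (low.drop pc.1.toNat)
            then m.add name else m) m)
      init.2
  let mentioned := available_names.filter (fun name => matched.contains name)
  if mentioned.isEmpty then available_names else mentioned

-- ===== PRECONDITION & SPEC =====
def Spec_extract_character_names_from_outline (outline : String) (available_names : List String) (out : List String) : Prop := out = extract_character_names_from_outline_alt outline available_names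
instance (outline : String) (available_names : List String) (out : List String) : Decidable (Spec_extract_character_names_from_outline outline available_names out) := by unfold Spec_extract_character_names_from_outline; infer_instance

-- ===== CLAIM (what is proved, stated in full; the proofs are below) =====
def Claim_equal_extract_character_names_from_outline : Prop := ∀ (outline : String) (available_names : List String), Dom_extract_character_names_from_outline outline available_names → Spec_extract_character_names_from_outline outline available_names (extract_character_names_from_outline outline available_names)

-- ===== LEMMAS AND PROOFS =====

-- membership after B's inner loop over one bucket of names
theorem mem_inner (names : List String) (m : PySem.Set String) (P : String → Prop)
    [DecidablePred P] (x : String) :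
    x ∈ (names.foldl (fun m name => if ¬ m.contains name ∧ P name then m.add name else m) m) ↔
    x ∈ m ∨ (x ∈ names ∧ P x) := by
  induction names generalizing m with
  | nil => simp
  | cons n ns ih =>
    simp only [List.foldl_cons, ih]
    split_ifs with h
    · obtain ⟨hc, hp⟩ := h
      rw [PySem.Set.mem_add]
      constructor
      · rintro ((h | rfl) | ⟨h1, h2⟩)
        · exact Or.inl h
        · exact Or.inr ⟨List.mem_cons_self, hp⟩
        · exact Or.inr ⟨List.mem_cons_of_mem _ h1, h2⟩
      · rintro (h | ⟨h1, h2⟩)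
        · exact Or.inl (Or.inl h)
        · rcases List.mem_cons.mp h1 with rfl | h1
          · exact Or.inl (Or.inr rfl)
          · exact Or.inr ⟨h1, h2⟩
    · rw [Decidable.not_and_iff_not_or_not] at h
      constructor
      · rintro (h' | ⟨h1, h2⟩)
        · exact Or.inl h'
        · exact Or.inr ⟨List.mem_cons_of_mem _ h1, h2⟩
      · rintro (h' | ⟨h1, h2⟩)
        · exact Or.inl h'
        · rcases List.mem_cons.mp h1 with rfl | h1
          · rcases h with hc | hp
            · exact Or.inl ((PySem.Set.contains_iff _ _).mp (Decidable.not_not.mp hc))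
            · exact absurd h2 hp
          · exact Or.inr ⟨h1, h2⟩

-- the bucket of first letter c after B's index-building loop
theorem build_fst_getD (names : List String)
    (st : PySem.Dict Char (List String) × PySem.Set String) (c : Char) :
    ((names.foldl
      (fun st name =>
        match (PySem.Str.lower name).toList with
        | [] => (st.1, st.2.add name)
        | c :: _ => (st.1.modify c [] (fun l => l ++ [name]), st.2))
      st).1).getD c []
    = st.1.getD c [] ++ names.filter (fun n => (PySem.Str.lower n).toList.head? == some c) := by
  induction names generalizing st with
  | nil => simp
  | cons n ns ih =>
    simp only [List.foldl_cons]
    rw [ih, List.filter_cons]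
    cases ht : (PySem.Str.lower n).toList with
    | nil => simp
    | cons c' rest =>
      rw [PySem.Dict.getD_modify]
      by_cases hc : c = c'
      · subst hc; simp
      · simp [hc, Ne.symm hc]

-- the initially-matched set (names whose lowercase form is empty)
theorem build_snd_mem (names : List String)
    (st : PySem.Dict Char (List String) × PySem.Set String) (x : String) :
    x ∈ (names.foldl
      (fun st name =>
        match (PySem.Str.lower name).toList with
        | [] => (st.1, st.2.add name)
        | c :: _ => (st.1.modify c [] (fun l => l ++ [name]), st.2))
      st).2
    ↔ x ∈ st.2 ∨ (x ∈ names ∧ (PySem.Str.lower x).toList = []) := by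
  induction names generalizing st with
  | nil => simp
  | cons n ns ih =>
    simp only [List.foldl_cons]
    rw [ih]
    cases ht : (PySem.Str.lower n).toList with
    | nil =>
      simp only [PySem.Set.mem_add]
      constructor
      · rintro ((h | rfl) | ⟨h1, h2⟩)
        · exact Or.inl h
        · exact Or.inr ⟨List.mem_cons_self, ht⟩
        · exact Or.inr ⟨List.mem_cons_of_mem _ h1, h2⟩
      · rintro (h | ⟨h1, h2⟩)
        · exact Or.inl (Or.inl h)
        · rcases List.mem_cons.mp h1 with rfl | h1
          · exact Or.inl (Or.inr rfl)
          · exact Or.inr ⟨h1, h2⟩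
    | cons c' rest =>
      constructor
      · rintro (h | ⟨h1, h2⟩)
        · exact Or.inl h
        · exact Or.inr ⟨List.mem_cons_of_mem _ h1, h2⟩
      · rintro (h | ⟨h1, h2⟩)
        · exact Or.inl h
        · rcases List.mem_cons.mp h1 with rfl | h1
          · rw [ht] at h2; exact absurd h2 (by simp)
          · exact Or.inr ⟨h1, h2⟩

-- membership after B's outer scan over the enumerated outline
theorem mem_outer (d : PySem.Dict Char (List String)) (poss : List (Int × Char))
    (m : PySem.Set String) (low : List Char) (x : String) :
    x ∈ (poss.foldl
      (fun m pc => (d.getD pc.2 []).foldl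
        (fun m name =>
          if ¬ m.contains name ∧ List.isPrefixOf (PySem.Str.lower name).toList (low.drop pc.1.toNat)
          then m.add name else m) m) m) ↔
    x ∈ m ∨ ∃ pc ∈ poss, x ∈ d.getD pc.2 [] ∧
      List.isPrefixOf (PySem.Str.lower x).toList (low.drop pc.1.toNat) := by
  induction poss generalizing m with
  | nil => simp
  | cons p ps ih =>
    simp only [List.foldl_cons, ih, mem_inner]
    constructor
    · rintro ((h | ⟨h1, h2⟩) | ⟨pc, h1, h2, h3⟩)
      · exact Or.inl h
      · exact Or.inr ⟨p, by simp, h1, h2⟩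
      · exact Or.inr ⟨pc, by simp [h1], h2, h3⟩
    · rintro (h | ⟨pc, h1, h2, h3⟩)
      · exact Or.inl (Or.inl h)
      · rcases List.mem_cons.mp h1 with rfl | h1
        · exact Or.inl (Or.inr ⟨h2, h3⟩)
        · exact Or.inr ⟨pc, h1, h2, h3⟩

-- a first-letter-compatible match at some scanned position is exactly Python's substring test
theorem exists_enum_iff_isIn (low cs : List Char) :
    ((cs = []) ∨ ∃ pc ∈ PySem.List.enumerate low 0,
        cs.head? = some pc.2 ∧ List.isPrefixOf cs (low.drop pc.1.toNat)) ↔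
    PySem.Chars.isIn cs low = true := by
  rw [← PySem.Chars.exists_prefix_drop_iff_isIn]
  constructor
  · rintro (rfl | ⟨pc, _, _, h⟩)
    · exact ⟨0, List.nil_prefix⟩
    · exact ⟨pc.1.toNat, List.isPrefixOf_iff_prefix.mp h⟩
  · rintro ⟨j, h⟩
    cases hcs : cs with
    | nil => exact Or.inl rfl
    | cons c rest =>
      subst hcs
      obtain ⟨t, ht⟩ := h
      have hhd : low[j]? = some c := by
        rw [← List.head?_drop, ← ht]
        rfl
      have hj : j < low.length := by
        by_contra hj
        rw [List.getElem?_eq_none_iff.mpr (by omega)] at hhd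
        simp at hhd
      refine Or.inr ⟨((j : Int), low[j]), ?_, ?_, ?_⟩
      · rw [PySem.List.mem_enumerate_iff]
        exact ⟨j, hj, by simp⟩
      · simp only [List.head?_cons]
        rw [List.getElem?_eq_getElem hj] at hhd
        exact congrArg some (Option.some.inj hhd).symm
      · rw [List.isPrefixOf_iff_prefix]
        simp only [Int.toNat_natCast]
        exact ⟨t, ht⟩

-- ===== VERDICT (by name: the statement is the Claim_ definition above) =====
theorem extract_character_names_from_outline_spec : Claim_equal_extract_character_names_from_outline := by
  intro outline available_names _
  unfold Spec_extract_character_names_from_outline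
  unfold extract_character_names_from_outline extract_character_names_from_outline_alt
  simp only
  rw [PySem.List.foldl_append_if_eq_filter, List.nil_append]
  have hfil : available_names.filter (fun name => PySem.Str.isIn (PySem.Str.lower name) (PySem.Str.lower outline))
      = available_names.filter (fun name =>
          PySem.Set.contains
            ((PySem.List.enumerate (PySem.Str.lower outline).toList 0).foldl
              (fun m pc =>
                (((available_names.foldl
                    (fun st name =>
                      match (PySem.Str.lower name).toList with
                      | [] => (st.1, st.2.add name)
                      | c :: _ => (st.1.modify c [] (fun l => l ++ [name]), st.2))
                    (PySem.Dict.empty, PySem.Set.empty)).1).getD pc.2 []).foldl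
                  (fun m name =>
                    if ¬ m.contains name ∧ List.isPrefixOf (PySem.Str.lower name).toList
                        ((PySem.Str.lower outline).toList.drop pc.1.toNat)
                    then m.add name else m) m)
              ((available_names.foldl
                  (fun st name =>
                    match (PySem.Str.lower name).toList with
                    | [] => (st.1, st.2.add name)
                    | c :: _ => (st.1.modify c [] (fun l => l ++ [name]), st.2))
                  (PySem.Dict.empty, PySem.Set.empty)).2))
            name) := by
    apply List.filter_congr
    intro name hmem
    rw [Bool.eq_iff_iff, PySem.Set.contains_iff, mem_outer, build_snd_mem, PySem.Str.isIn_eq,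
      ← exists_enum_iff_isIn ((PySem.Str.lower outline).toList) ((PySem.Str.lower name).toList)]
    constructor
    · rintro (heq | ⟨pc, h1, h2, h3⟩)
      · exact Or.inl (Or.inr ⟨hmem, heq⟩)
      · refine Or.inr ⟨pc, h1, ?_, h3⟩
        rw [build_fst_getD]
        simp only [PySem.Dict.getD_empty, List.nil_append, List.mem_filter]
        exact ⟨hmem, by simpa using h2⟩
    · rintro ((h | ⟨_, h2⟩) | ⟨pc, h1, h2, h3⟩)
      · exact absurd h (by simp [PySem.Set.empty])
      · exact Or.inl h2
      · rw [build_fst_getD] at h2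
        simp only [PySem.Dict.getD_empty, List.nil_append, List.mem_filter] at h2
        refine Or.inr ⟨pc, h1, ?_, h3⟩
        simpa using h2.2
  rw [hfil]
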